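-- pv_equiv track=rewrite | github.com/Magdamit173/Punnett_Square | app.py | genetic_info
-- ===== SOURCE A (Python) =====
-- def sanitize_alleles(alleles):
--     list_of_duplicates = []
--     list_of_alleles = []
--
--     number_of_call = 0
--     overall_call = 0
--
--     for allele_index, allele in enumerate(list(alleles)):
--         for _allele_index, _allele in enumerate(list(alleles)):
--             if (
--                 (allele_index == _allele_index)
--                 or (allele_index in list_of_duplicates)
--                 or (_allele_index in list_of_duplicates)
--             ):
--                 continue
--
--             if allele.lower() == _allele.lower():
--                 list_of_duplicates.append(_allele_index)
--
--                 list_of_alleles.append(sorted([allele, _allele]))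
--
--     return list_of_alleles
--
-- def genetic_info(genetics):
--     allele_structure = []
--
--     alleles = sanitize_alleles(genetics)
--
--     if not genetics:
--         return
--
--     amount_of_traits = len(alleles) # 3
--     amount_of_alleles = amount_of_traits * 2 #6
--     amount_of_combinations = pow(2, amount_of_traits) #16
--
--     inverted_alleles = [allele[::-1] for allele in alleles]
--
--     for genetic_range in range(amount_of_combinations):
--         cache_structure = []
--         binary_allele = bin(genetic_range)[2:].zfill(amount_of_traits)
--
--         for index, (first_item, second_item) in enumerate(zip(inverted_alleles, list(binary_allele))):
--             cache_structure.append(first_item[int(second_item)])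
--
--         allele_structure.append(cache_structure)
--
--
--
--     return allele_structure[::-1]
-- ===== SOURCE B (Python) =====
-- def sanitize_alleles(alleles):
--     list_of_duplicates = []
--     list_of_alleles = []
--
--     number_of_call = 0
--     overall_call = 0
--
--     for allele_index, allele in enumerate(list(alleles)):
--         for _allele_index, _allele in enumerate(list(alleles)):
--             if (
--                 (allele_index == _allele_index)
--                 or (allele_index in list_of_duplicates)
--                 or (_allele_index in list_of_duplicates)
--             ):
--                 continue
--
--             if allele.lower() == _allele.lower():
--                 list_of_duplicates.append(_allele_index)
--
--                 list_of_alleles.append(sorted([allele, _allele]))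
--
--     return list_of_alleles
--
--
-- def genetic_info(genetics):
--     # Same sanitizing step; the enumeration of the 2**n genotype combinations is
--     # rebuilt incrementally (cartesian-product extension) instead of decoding
--     # binary-counter strings, which also makes the final [::-1] unnecessary.
--     alleles = sanitize_alleles(genetics)
--
--     if not genetics:
--         return None
--
--     combos = [[]]
--     for pair in alleles:
--         combos = [combo + [choice] for combo in combos for choice in (pair[0], pair[1])]
--     return combos
-- ===== Notes on version B (the rewrite author's own statement) =====
-- stated objective: simpler
-- what changed: A enumerates the 2^n genotype combinations by counting in binary, zero-padding bin(k) strings and indexing each reversed pair by the digit, then reverses the result; B keeps sanitize_alleles verbatim and instead grows the combination list incrementally as a cartesian product (extend every partial combination by pair[0] then pair[1]), which makes the bit-string decoding and the final [::-1] disappear.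
import Mathlib
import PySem

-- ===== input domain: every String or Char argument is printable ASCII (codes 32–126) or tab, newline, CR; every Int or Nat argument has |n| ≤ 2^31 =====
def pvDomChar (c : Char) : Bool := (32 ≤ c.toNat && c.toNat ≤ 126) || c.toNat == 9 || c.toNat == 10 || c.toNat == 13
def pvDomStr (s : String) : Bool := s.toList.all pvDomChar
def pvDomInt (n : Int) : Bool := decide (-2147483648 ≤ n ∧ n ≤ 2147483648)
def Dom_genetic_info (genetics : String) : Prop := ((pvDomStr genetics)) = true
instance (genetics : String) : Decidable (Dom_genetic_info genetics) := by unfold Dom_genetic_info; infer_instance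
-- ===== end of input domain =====

-- B replaces A's binary-counter decoding of the 2^n genotype combinations by an incremental
-- cartesian-product build (which also removes the final [::-1]); sanitize_alleles is kept
-- verbatim and shared by both ports. Objective: simpler.

-- ===== PORT A =====
-- shared helper, identical in Source A and Source B: sanitize_alleles(alleles)
-- (list(alleles) iterates the string as 1-character strings; the state threaded through the
-- two loops is the pair (list_of_duplicates, list_of_alleles); number_of_call/overall_call
-- are dead variables in the Python and are dropped)
def sanitize_alleles (alleles : String) : List (List String) :=
  let chars : List String := alleles.toList.map (fun c => String.ofList [c])
  let st :=
    (PySem.List.enumerate chars).foldl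
      (fun (st : List Int × List (List String)) ai =>
        (PySem.List.enumerate chars).foldl
          (fun (st : List Int × List (List String)) bi =>
            if ai.1 = bi.1 ∨ ai.1 ∈ st.1 ∨ bi.1 ∈ st.1 then st
            else if PySem.Str.lower ai.2 = PySem.Str.lower bi.2 then
              (st.1 ++ [bi.1], st.2 ++ [PySem.List.sorted [ai.2, bi.2] (fun s => s)])
            else st)
          st)
      ([], [])
  st.2

-- port of Source A's genetic_info; `not genetics` is `genetics.toList = []`;
-- bin(k)[2:] is PySem.List.slice (PySem.Int.toBinChars0b k) (some 2) none;
-- allele[::-1] is List.reverse (PySem.List.slice?_none_none_neg_one);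
-- first_item[int(second_item)] reads index int(c) of the binary digit c ∈ {'0','1'},
-- i.e. (if c = '1' then 1 else 0), always in range of the 2-element pair
-- (the .getD "" default is unreachable); the enumerate index of the inner loop is unused.
def genetic_info (genetics : String) : Option (List (List String)) :=
  let alleles := sanitize_alleles genetics
  if genetics.toList = [] then none
  else
    let amount_of_traits := alleles.length
    let amount_of_combinations := 2 ^ amount_of_traits
    let inverted_alleles := alleles.map (fun a => a.reverse)
    let allele_structure :=
      (List.range amount_of_combinations).foldl
        (fun (acc : List (List String)) (k : Nat) =>
          let binary_allele :=
            PySem.Chars.zfill (PySem.List.slice (PySem.Int.toBinChars0b (k : Int)) (some 2) none)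
              (amount_of_traits : Int)
          let cache_structure :=
            (inverted_alleles.zip binary_allele).foldl
              (fun c q => c ++ [(PySem.List.pyGet? q.1 (if q.2 = '1' then 1 else 0)).getD ""]) []
          acc ++ [cache_structure])
        []
    some allele_structure.reverse

-- ===== PORT B =====
-- port of Source B's genetic_info: the combination list is grown pair by pair
-- (the comprehension over (pair[0], pair[1]) is the flatMap); no final reversal.
def genetic_info_alt (genetics : String) : Option (List (List String)) :=
  let alleles := sanitize_alleles genetics
  if genetics.toList = [] then none
  else
    some (alleles.foldl
      (fun combos pair =>
        combos.flatMap (fun combo =>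
          [combo ++ [(PySem.List.pyGet? pair 0).getD ""],
           combo ++ [(PySem.List.pyGet? pair 1).getD ""]]))
      [[]])

-- ===== PRECONDITION & SPEC =====
def Spec_genetic_info (genetics : String) (out : Option (List (List String))) : Prop := out = genetic_info_alt genetics
instance (genetics : String) (out : Option (List (List String))) : Decidable (Spec_genetic_info genetics out) := by unfold Spec_genetic_info; infer_instance

-- ===== CLAIM (what is proved, stated in full; the proofs are below) =====
def Claim_equal_genetic_info : Prop := ∀ (genetics : String), Dom_genetic_info genetics → Spec_genetic_info genetics (genetic_info genetics)

-- ===== LEMMAS AND PROOFS =====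

-- abbreviations used by the proofs only
def pickD (p : List String) (i : Int) : String := (PySem.List.pyGet? p i).getD ""

def zfNat (n : Nat) (cs : List Char) : List Char := List.replicate (n - cs.length) '0' ++ cs

def rowMap (ps : List (List String)) (ds : List Char) : List String :=
  ((ps.map List.reverse).zip ds).map (fun q => pickD q.1 (if q.2 = '1' then 1 else 0))

def stepB (combos : List (List String)) (pair : List String) : List (List String) :=
  combos.flatMap (fun c => [c ++ [pickD pair 0], c ++ [pickD pair 1]])

-- Nat.toDigits 2 (bin(k)[2:]): accumulator characterisation and binary recursion
theorem toDigitsCore_two_acc : ∀ (n f : Nat) (ds : List Char), n < f →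
    Nat.toDigitsCore 2 f n ds = Nat.toDigits 2 n ++ ds := by
  intro n
  induction n using Nat.strong_induction_on with
  | _ n ih =>
    intro f ds hf
    match f, hf with
    | f + 1, hf =>
      by_cases h0 : n / 2 = 0
      · simp [Nat.toDigitsCore, Nat.toDigits, h0]
      · have hlt : n / 2 < n := Nat.div_lt_self (by omega) (by omega)
        have h1 : Nat.toDigitsCore 2 (f+1) n ds
            = Nat.toDigitsCore 2 f (n/2) ((n % 2).digitChar :: ds) := by
          simp [Nat.toDigitsCore, h0]
        have h2 : Nat.toDigits 2 n
            = Nat.toDigitsCore 2 n (n/2) ((n % 2).digitChar :: []) := by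
          simp [Nat.toDigits, Nat.toDigitsCore, h0]
        rw [h1, ih _ hlt f _ (by omega), h2, ih _ hlt n _ (by omega)]
        simp

theorem toDigits_two_rec (n : Nat) (h : 2 ≤ n) :
    Nat.toDigits 2 n = Nat.toDigits 2 (n / 2) ++ [Nat.digitChar (n % 2)] := by
  have h0 : ¬ n / 2 = 0 := by omega
  have h1 : Nat.toDigits 2 n = Nat.toDigitsCore 2 n (n/2) [(n % 2).digitChar] := by
    simp [Nat.toDigits, Nat.toDigitsCore, h0]
  rw [h1, toDigitsCore_two_acc _ _ _ (Nat.div_lt_self (by omega) (by omega))]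

theorem toDigits_two_head (n : Nat) :
    ∃ c cs, Nat.toDigits 2 n = c :: cs ∧ c ≠ '+' ∧ c ≠ '-' := by
  induction n using Nat.strong_induction_on with
  | _ n ih =>
    by_cases h : 2 ≤ n
    · obtain ⟨c, cs, hcs, h1, h2⟩ := ih (n/2) (Nat.div_lt_self (by omega) (by omega))
      exact ⟨c, cs ++ [Nat.digitChar (n % 2)], by rw [toDigits_two_rec n h, hcs]; simp, h1, h2⟩
    · interval_cases n
      · exact ⟨'0', [], by decide⟩
      · exact ⟨'1', [], by decide⟩

theorem length_zfNat (n : Nat) (cs : List Char) : (zfNat n cs).length = max n cs.length := by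
  simp [zfNat]; omega

theorem zfill_eq_zfNat (n : Nat) (c : Char) (cs : List Char) (h1 : c ≠ '+') (h2 : c ≠ '-') :
    PySem.Chars.zfill (c :: cs) (n : Int) = zfNat n (c :: cs) := by
  rw [PySem.Chars.zfill, zfNat]
  split
  · next h =>
    have hh : n - (cs.length + 1) = 0 := by simp at h; omega
    simp [hh]
  · next h => simp [h1, h2]

theorem zfNat_append_singleton (m : Nat) (s : List Char) (d : Char) :
    zfNat m (s ++ [d]) = zfNat (m - 1) s ++ [d] := by
  simp [zfNat]
  have : m - (s.length + 1) = m - 1 - s.length := by omega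
  rw [this]

theorem zfNat_split (n k : Nat) (hn : 1 ≤ n) :
    zfNat (n + 1) (Nat.toDigits 2 k) = zfNat n (Nat.toDigits 2 (k / 2)) ++ [Nat.digitChar (k % 2)] := by
  by_cases h : 2 ≤ k
  · rw [toDigits_two_rec k h, zfNat_append_singleton]; simp
  · have hz : zfNat n [] = zfNat n ['0'] := by
      simp [zfNat]
      conv_lhs => rw [show n = (n-1) + 1 by omega, List.replicate_succ']
    interval_cases k
    · rw [show Nat.toDigits 2 0 = [] ++ ['0'] by decide, zfNat_append_singleton]
      simp [hz]
      decide
    · rw [show Nat.toDigits 2 1 = [] ++ ['1'] by decide, zfNat_append_singleton]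
      simp [hz]
      decide

-- the binary string built by port A equals zfNat of Nat.toDigits
theorem binary_eq (n k : Nat) :
    PySem.Chars.zfill (PySem.List.slice (PySem.Int.toBinChars0b (k : Int)) (some 2) none) (n : Int)
      = zfNat n (Nat.toDigits 2 k) := by
  have h1 : PySem.Int.toBinChars0b (k : Int) = '0' :: 'b' :: Nat.toDigits 2 k := by
    simp [PySem.Int.toBinChars0b]
  rw [h1]
  have h2 : PySem.List.slice ('0' :: 'b' :: Nat.toDigits 2 k) (some 2) none = Nat.toDigits 2 k := by
    simp [PySem.List.slice_from]
  rw [h2]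
  obtain ⟨c, cs, hcs, hp, hm⟩ := toDigits_two_head k
  rw [hcs, zfill_eq_zfNat n c cs hp hm]

theorem map_range_double {β : Type} (m : Nat) (f : Nat → β) :
    (List.range (2 * m)).map f = (List.range m).flatMap (fun j => [f (2 * j), f (2 * j + 1)]) := by
  induction m with
  | zero => simp
  | succ m ih =>
    rw [show 2 * (m + 1) = (2 * m) + 1 + 1 by omega, List.range_succ, List.range_succ,
      List.range_succ]
    simp [ih]

-- one row of A (n+1 digits) = the row for the quotient plus the pick of the last digit
theorem rowMap_split (ps : List (List String)) (p : List String) (k : Nat) (hk : k < 2 ^ (ps.length + 1)) :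
    rowMap (ps ++ [p]) (zfNat (ps.length + 1) (Nat.toDigits 2 k))
      = rowMap ps (zfNat ps.length (Nat.toDigits 2 (k / 2)))
        ++ [pickD p.reverse (if Nat.digitChar (k % 2) = '1' then 1 else 0)] := by
  rcases ps with _ | ⟨q, qs⟩
  · simp only [List.length_nil, pow_succ, pow_zero, one_mul] at hk
    interval_cases k
    · simp [rowMap, zfNat, show Nat.toDigits 2 0 = ['0'] by decide,
        show Nat.digitChar 0 = '0' by decide]
    · simp [rowMap, zfNat, show Nat.toDigits 2 1 = ['1'] by decide,
        show Nat.digitChar 1 = '1' by decide]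
  · set n := (q :: qs).length with hn
    have hn1 : 1 ≤ n := by simp [hn]
    rw [zfNat_split n k hn1]
    have hlen : (zfNat n (Nat.toDigits 2 (k / 2))).length = n := by
      rw [length_zfNat]
      have hk2 : k / 2 < 2 ^ n := by
        rw [pow_succ] at hk; omega
      have hle := Nat.toDigits_length 2 (k/2) n hn1 hk2
      omega
    rw [rowMap, rowMap, List.map_append, List.zip_append (by rw [hlen]; simp [hn]), List.map_append]
    simp

-- core: A's reversed binary-counter enumeration = B's incremental product
theorem enum_eq (ps : List (List String)) (h2 : ∀ p ∈ ps, ∃ x y, p = [x, y]) :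
    ((List.range (2 ^ ps.length)).map
        (fun k => rowMap ps (zfNat ps.length (Nat.toDigits 2 k)))).reverse
      = ps.foldl stepB [[]] := by
  induction ps using List.reverseRecOn with
  | nil => simp [rowMap, zfNat]
  | append_singleton ps p ih =>
    obtain ⟨x, y, hp⟩ := h2 p (by simp)
    have ihh := ih (fun q hq => h2 q (by simp [hq]))
    have hlen : (ps ++ [p]).length = ps.length + 1 := by simp
    rw [hlen, pow_succ, mul_comm, map_range_double]
    have hcong : ∀ j ∈ List.range (2 ^ ps.length),
        [rowMap (ps ++ [p]) (zfNat (ps.length + 1) (Nat.toDigits 2 (2 * j))),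
         rowMap (ps ++ [p]) (zfNat (ps.length + 1) (Nat.toDigits 2 (2 * j + 1)))]
        = [rowMap ps (zfNat ps.length (Nat.toDigits 2 j)) ++ [y],
           rowMap ps (zfNat ps.length (Nat.toDigits 2 j)) ++ [x]] := by
      intro j hj
      rw [List.mem_range] at hj
      rw [rowMap_split ps p (2 * j) (by rw [pow_succ]; omega),
          rowMap_split ps p (2 * j + 1) (by rw [pow_succ]; omega)]
      have e0 : (2 * j) / 2 = j := by omega
      have e1 : (2 * j + 1) / 2 = j := by omega
      have m0 : (2 * j) % 2 = 0 := by omega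
      have m1 : (2 * j + 1) % 2 = 1 := by omega
      rw [e0, e1, m0, m1, hp]
      simp [pickD, show Nat.digitChar 0 = '0' by decide, show Nat.digitChar 1 = '1' by decide]
    rw [List.flatMap_congr hcong, List.reverse_flatMap]
    have hflip : (List.reverse ∘ fun j =>
        [rowMap ps (zfNat ps.length (Nat.toDigits 2 j)) ++ [y],
         rowMap ps (zfNat ps.length (Nat.toDigits 2 j)) ++ [x]])
        = fun j => [rowMap ps (zfNat ps.length (Nat.toDigits 2 j)) ++ [x],
          rowMap ps (zfNat ps.length (Nat.toDigits 2 j)) ++ [y]] := by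
      funext j; simp
    rw [hflip]
    have hmb : (List.range (2 ^ ps.length)).reverse.flatMap
        (fun j => [rowMap ps (zfNat ps.length (Nat.toDigits 2 j)) ++ [x],
          rowMap ps (zfNat ps.length (Nat.toDigits 2 j)) ++ [y]])
        = ((List.range (2 ^ ps.length)).map
            (fun k => rowMap ps (zfNat ps.length (Nat.toDigits 2 k)))).reverse.flatMap
          (fun r => [r ++ [x], r ++ [y]]) := by
      rw [← List.map_reverse, List.flatMap_map]
    rw [hmb, ihh, List.foldl_append]
    simp only [List.foldl_cons, List.foldl_nil]
    rw [stepB, hp]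
    simp [pickD]

-- every pair sanitize_alleles emits is a two-element list
theorem sorted_pair_shape (a b : String) :
    ∃ x y, PySem.List.sorted [a, b] (fun s => s) = [x, y] := by
  have h := PySem.List.length_sorted [a, b] (fun s => s) false
  rcases hs : PySem.List.sorted [a, b] (fun s => s) with _ | ⟨x, _ | ⟨y, _ | _⟩⟩ <;>
    rw [hs] at h <;> simp_all

theorem sanitize_shape (g : String) : ∀ p ∈ sanitize_alleles g, ∃ x y, p = [x, y] := by
  rw [show sanitize_alleles g =
      ((PySem.List.enumerate (g.toList.map (fun c => String.ofList [c]))).foldl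
        (fun st ai => (PySem.List.enumerate (g.toList.map (fun c => String.ofList [c]))).foldl
          (fun (st : List Int × List (List String)) bi =>
            if ai.1 = bi.1 ∨ ai.1 ∈ st.1 ∨ bi.1 ∈ st.1 then st
            else if PySem.Str.lower ai.2 = PySem.Str.lower bi.2 then
              (st.1 ++ [bi.1], st.2 ++ [PySem.List.sorted [ai.2, bi.2] (fun s => s)])
            else st) st) ([], [])).2 from rfl]
  generalize PySem.List.enumerate (g.toList.map (fun c => String.ofList [c])) = l
  have main : ∀ (st : List Int × List (List String)),
      (∀ p ∈ st.2, ∃ x y, p = [x, y]) →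
      ∀ p ∈ (l.foldl (fun st ai => l.foldl (fun st bi =>
            if ai.1 = bi.1 ∨ ai.1 ∈ st.1 ∨ bi.1 ∈ st.1 then st
            else if PySem.Str.lower ai.2 = PySem.Str.lower bi.2 then
              (st.1 ++ [bi.1], st.2 ++ [PySem.List.sorted [ai.2, bi.2] (fun s => s)])
            else st) st) st).2, ∃ x y, p = [x, y] := by
    intro st hst
    refine List.foldlRecOn (motive := fun st : List Int × List (List String) =>
      ∀ p ∈ st.2, ∃ x y, p = [x, y]) l _ hst ?_
    intro st hst ai _
    refine List.foldlRecOn (motive := fun st : List Int × List (List String) =>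
      ∀ p ∈ st.2, ∃ x y, p = [x, y]) l _ hst ?_
    intro st hst bi _
    split
    · exact hst
    · split
      · intro p hp
        rcases List.mem_append.mp hp with h | h
        · exact hst p h
        · obtain ⟨x, y, hxy⟩ := sorted_pair_shape ai.2 bi.2
          exact ⟨x, y, by simpa [hxy] using h⟩
      · exact hst
  exact main ([], []) (by simp)

-- ===== VERDICT (by name: the statement is the Claim_ definition above) =====
theorem genetic_info_spec : Claim_equal_genetic_info := by
  intro g _
  unfold Spec_genetic_info genetic_info genetic_info_alt
  by_cases hg : g.toList = []
  · simp [hg]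
  · simp only [hg, if_false]
    congr 1
    have hstep : (fun (combos : List (List String)) (pair : List String) =>
        combos.flatMap (fun combo =>
          [combo ++ [(PySem.List.pyGet? pair 0).getD ""],
           combo ++ [(PySem.List.pyGet? pair 1).getD ""]])) = stepB := by
      funext combos pair; rw [stepB]; rfl
    rw [hstep, ← enum_eq (sanitize_alleles g) (sanitize_shape g)]
    congr 1
    rw [PySem.List.foldl_append_singleton_eq_map]
    simp only [List.nil_append]
    apply List.map_congr_left
    intro k _
    rw [binary_eq]
    rw [PySem.List.foldl_append_singleton_eq_map
      (f := fun q : List String × Char => (PySem.List.pyGet? q.1 (if q.2 = '1' then 1 else 0)).getD "")]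
    rw [rowMap]
    rfl
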